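-- pv_equiv track=rewrite | github.com/rastakoer/loto | app/streamlit_app.py | nb_dizaine
-- ===== SOURCE A (Python) =====
-- import operator as op
--
-- def nb_dizaine(tirage,dizaine):
--     result=[0,0,0,0,0]
--     for j in tirage:
--         if j<10:
--             result[0]+=1
--         elif j>=10 and j<20:      #
--             result[1]+=1                    #
--         elif j>=20 and j<30:      #   On va classer chaque chiffre d'un tirage dans une dizaine
--             result[2]+=1                    #
--         elif j>=30 and j<40:      #
--             result[3]+=1
--         else:
--             result[4]+=1
--     diz = op.countOf(result, 0)        #   On regarde le nombre de dizaine à 0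
--     diz_min, diz_max=dizaine[0], dizaine[1]
--     if diz>=diz_min and diz<=diz_max:
--         return True
--     else:
--         return False
-- ===== SOURCE B (Python) =====
-- # B: instead of tallying every draw into a five-slot count array and scanning
-- # it for zeros, check each decade independently: a decade is empty iff no draw
-- # falls in its half-open interval. diz = number of empty decades.
-- DECADES = [(None, 10), (10, 20), (20, 30), (30, 40), (40, None)]
--
-- def _decade_empty(tirage, lo, hi):
--     return not any((lo is None or j >= lo) and (hi is None or j < hi) for j in tirage)
--
-- def nb_dizaine(tirage, dizaine):
--     diz = sum(_decade_empty(tirage, lo, hi) for lo, hi in DECADES)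
--     return dizaine[0] <= diz <= dizaine[1]
-- ===== Notes on version B (the rewrite author's own statement) =====
-- stated objective: alternative
-- what changed: A makes one pass tallying every draw into a five-slot count array and then scans it for zeros; B never counts: it tests each decade independently with an any() scan over the draw (empty iff no draw lies in its half-open interval) and sums the five emptiness flags.
import Mathlib
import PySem

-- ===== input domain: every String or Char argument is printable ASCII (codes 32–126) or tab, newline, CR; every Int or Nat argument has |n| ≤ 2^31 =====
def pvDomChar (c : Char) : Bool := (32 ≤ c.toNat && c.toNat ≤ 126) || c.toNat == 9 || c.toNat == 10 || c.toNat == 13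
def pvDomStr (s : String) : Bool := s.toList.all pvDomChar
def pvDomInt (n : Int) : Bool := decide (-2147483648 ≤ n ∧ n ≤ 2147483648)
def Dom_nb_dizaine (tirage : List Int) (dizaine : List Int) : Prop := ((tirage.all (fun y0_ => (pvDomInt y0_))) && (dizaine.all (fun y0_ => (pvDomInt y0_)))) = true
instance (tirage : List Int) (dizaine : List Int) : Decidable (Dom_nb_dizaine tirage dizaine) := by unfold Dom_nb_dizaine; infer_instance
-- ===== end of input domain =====

-- B tests each decade independently (empty iff no draw lies in its interval) and
-- sums the five emptiness flags, instead of A's count array + zero-scan (alternative).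

-- ===== PORT A =====
-- the five-slot list result[0..4] is carried as a 5-tuple of counters
def pvStepA (r : Int × Int × Int × Int × Int) (j : Int) : Int × Int × Int × Int × Int :=
  match r with
  | (a, b, c, d, e) =>
    if j < 10 then (a + 1, b, c, d, e)
    else if 10 ≤ j ∧ j < 20 then (a, b + 1, c, d, e)
    else if 20 ≤ j ∧ j < 30 then (a, b, c + 1, d, e)
    else if 30 ≤ j ∧ j < 40 then (a, b, c, d + 1, e)
    else (a, b, c, d, e + 1)

def nb_dizaine (tirage : List Int) (dizaine : List Int) : Bool :=
  match tirage.foldl pvStepA (0, 0, 0, 0, 0) with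
  | (a, b, c, d, e) =>
    let diz : Int := (PySem.List.count [a, b, c, d, e] 0 : Int)
    match PySem.List.pyGet? dizaine 0, PySem.List.pyGet? dizaine 1 with
    | some dmin, some dmax => decide (dmin ≤ diz ∧ diz ≤ dmax)
    | _, _ => false

-- ===== PORT B =====
def pvDecades : List (Option Int × Option Int) :=
  [(none, some 10), (some 10, some 20), (some 20, some 30), (some 30, some 40), (some 40, none)]

def pvInDecade (lo hi : Option Int) (j : Int) : Bool :=
  (match lo with | none => true | some l => decide (l ≤ j)) &&
  (match hi with | none => true | some h => decide (j < h))

def pvDecadeEmpty (tirage : List Int) (lo hi : Option Int) : Bool :=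
  !(tirage.any (pvInDecade lo hi))

def nb_dizaine_alt (tirage : List Int) (dizaine : List Int) : Bool :=
  let diz : Int :=
    pvDecades.foldl (fun acc p => acc + (if pvDecadeEmpty tirage p.1 p.2 then 1 else 0)) 0
  match PySem.List.pyGet? dizaine 0 with
  | none => false
  | some dmin =>
    match PySem.List.pyGet? dizaine 1 with
    | none => false
    | some dmax => decide (dmin ≤ diz ∧ diz ≤ dmax)

-- ===== PRECONDITION & SPEC =====
-- A raises IndexError when dizaine has fewer than 2 elements; those inputs are excluded.
def Pre_nb_dizaine (tirage : List Int) (dizaine : List Int) : Prop := 2 ≤ dizaine.length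
instance (tirage : List Int) (dizaine : List Int) : Decidable (Pre_nb_dizaine tirage dizaine) := by unfold Pre_nb_dizaine; infer_instance
def pvWitness_nb_dizaine : List Int × List Int := ([3, 17, 55], [1, 4])

def Spec_nb_dizaine (tirage : List Int) (dizaine : List Int) (out : Bool) : Prop := out = nb_dizaine_alt tirage dizaine
instance (tirage : List Int) (dizaine : List Int) (out : Bool) : Decidable (Spec_nb_dizaine tirage dizaine out) := by unfold Spec_nb_dizaine; infer_instance

-- ===== CLAIM (what is proved, stated in full; the proofs are below) =====
def Claim_equal_nb_dizaine : Prop := ∀ (tirage : List Int) (dizaine : List Int), Dom_nb_dizaine tirage dizaine → Pre_nb_dizaine tirage dizaine → Spec_nb_dizaine tirage dizaine (nb_dizaine tirage dizaine)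

-- ===== LEMMAS AND PROOFS =====

-- A's fold adds, to each initial counter, the number of draws in that decade
theorem pvFoldA_eq (l : List Int) (a b c d e : Int) :
    l.foldl pvStepA (a, b, c, d, e) =
      (a + (l.countP (fun j => decide (j < 10)) : Int),
       b + (l.countP (fun j => decide (10 ≤ j ∧ j < 20)) : Int),
       c + (l.countP (fun j => decide (20 ≤ j ∧ j < 30)) : Int),
       d + (l.countP (fun j => decide (30 ≤ j ∧ j < 40)) : Int),
       e + (l.countP (fun j => decide (40 ≤ j)) : Int)) := by
  induction l generalizing a b c d e with
  | nil => simp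
  | cons x t ih =>
    simp only [List.foldl_cons, List.countP_cons, pvStepA]
    rcases lt_or_ge x 10 with h1 | h1
    · rw [if_pos h1, ih]
      have d0 : decide (x < 10) = true := by simp [h1]
      have d1 : decide (10 ≤ x ∧ x < 20) = false := decide_eq_false (by omega)
      have d2 : decide (20 ≤ x ∧ x < 30) = false := decide_eq_false (by omega)
      have d3 : decide (30 ≤ x ∧ x < 40) = false := decide_eq_false (by omega)
      have d4 : decide (40 ≤ x) = false := decide_eq_false (by omega)
      simp only [d0, d1, d2, d3, d4, if_true, Prod.mk.injEq]
      push_cast; omega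
    · rcases lt_or_ge x 20 with h2 | h2
      · rw [if_neg (by omega), if_pos (by omega : 10 ≤ x ∧ x < 20), ih]
        have d0 : decide (x < 10) = false := decide_eq_false (by omega)
        have d1 : decide (10 ≤ x ∧ x < 20) = true := decide_eq_true (by omega)
        have d2 : decide (20 ≤ x ∧ x < 30) = false := decide_eq_false (by omega)
        have d3 : decide (30 ≤ x ∧ x < 40) = false := decide_eq_false (by omega)
        have d4 : decide (40 ≤ x) = false := decide_eq_false (by omega)
        simp only [d0, d1, d2, d3, d4, if_true, Prod.mk.injEq]
        push_cast; omega
      · rcases lt_or_ge x 30 with h3 | h3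
        · rw [if_neg (by omega), if_neg (by omega : ¬(10 ≤ x ∧ x < 20)),
            if_pos (by omega : 20 ≤ x ∧ x < 30), ih]
          have d0 : decide (x < 10) = false := decide_eq_false (by omega)
          have d1 : decide (10 ≤ x ∧ x < 20) = false := decide_eq_false (by omega)
          have d2 : decide (20 ≤ x ∧ x < 30) = true := decide_eq_true (by omega)
          have d3 : decide (30 ≤ x ∧ x < 40) = false := decide_eq_false (by omega)
          have d4 : decide (40 ≤ x) = false := decide_eq_false (by omega)
          simp only [d0, d1, d2, d3, d4, if_true, Prod.mk.injEq]
          push_cast; omega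
        · rcases lt_or_ge x 40 with h4 | h4
          · rw [if_neg (by omega), if_neg (by omega : ¬(10 ≤ x ∧ x < 20)),
              if_neg (by omega : ¬(20 ≤ x ∧ x < 30)), if_pos (by omega : 30 ≤ x ∧ x < 40), ih]
            have d0 : decide (x < 10) = false := decide_eq_false (by omega)
            have d1 : decide (10 ≤ x ∧ x < 20) = false := decide_eq_false (by omega)
            have d2 : decide (20 ≤ x ∧ x < 30) = false := decide_eq_false (by omega)
            have d3 : decide (30 ≤ x ∧ x < 40) = true := decide_eq_true (by omega)
            have d4 : decide (40 ≤ x) = false := decide_eq_false (by omega)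
            simp only [d0, d1, d2, d3, d4, if_true, Prod.mk.injEq]
            push_cast; omega
          · rw [if_neg (by omega), if_neg (by omega : ¬(10 ≤ x ∧ x < 20)),
              if_neg (by omega : ¬(20 ≤ x ∧ x < 30)), if_neg (by omega : ¬(30 ≤ x ∧ x < 40)), ih]
            have d0 : decide (x < 10) = false := decide_eq_false (by omega)
            have d1 : decide (10 ≤ x ∧ x < 20) = false := decide_eq_false (by omega)
            have d2 : decide (20 ≤ x ∧ x < 30) = false := decide_eq_false (by omega)
            have d3 : decide (30 ≤ x ∧ x < 40) = false := decide_eq_false (by omega)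
            have d4 : decide (40 ≤ x) = true := decide_eq_true (by omega)
            simp only [d0, d1, d2, d3, d4, if_true, Prod.mk.injEq]
            push_cast; omega

-- a decade is empty iff the count of draws in it is zero
theorem pvEmpty_iff (l : List Int) (lo hi : Option Int) (p : Int → Bool)
    (hpt : ∀ j, pvInDecade lo hi j = p j) :
    pvDecadeEmpty l lo hi = decide (l.countP p = 0) := by
  have hfun : pvInDecade lo hi = p := funext hpt
  simp only [pvDecadeEmpty, hfun]
  rcases hb : l.any p with _ | _
  · have hall := List.any_eq_false.mp hb
    have hz : l.countP p = 0 := List.countP_eq_zero.mpr (fun a ha => by simpa using hall a ha)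
    simp [hz]
  · obtain ⟨a, ha, hpa⟩ := List.any_eq_true.mp hb
    have hnz : l.countP p ≠ 0 := fun h0 => (List.countP_eq_zero.mp h0 a ha) hpa
    simp [hnz]

-- ===== VERDICT (by name: the statement is the Claim_ definition above) =====
theorem nb_dizaine_spec : Claim_equal_nb_dizaine := by
  intro tirage dizaine _ _
  unfold Spec_nb_dizaine nb_dizaine nb_dizaine_alt
  rw [pvFoldA_eq]
  have e0 := pvEmpty_iff tirage none (some 10) (fun j => decide (j < 10))
    (by intro j; simp [pvInDecade])
  have e1 := pvEmpty_iff tirage (some 10) (some 20) (fun j => decide (10 ≤ j ∧ j < 20))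
    (by intro j; simp [pvInDecade, Bool.decide_and])
  have e2 := pvEmpty_iff tirage (some 20) (some 30) (fun j => decide (20 ≤ j ∧ j < 30))
    (by intro j; simp [pvInDecade, Bool.decide_and])
  have e3 := pvEmpty_iff tirage (some 30) (some 40) (fun j => decide (30 ≤ j ∧ j < 40))
    (by intro j; simp [pvInDecade, Bool.decide_and])
  have e4 := pvEmpty_iff tirage (some 40) none (fun j => decide (40 ≤ j))
    (by intro j; simp [pvInDecade])
  have hdiz :
      (PySem.List.count
        [(0 : Int) + (tirage.countP (fun j => decide (j < 10)) : Int),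
         (0 : Int) + (tirage.countP (fun j => decide (10 ≤ j ∧ j < 20)) : Int),
         (0 : Int) + (tirage.countP (fun j => decide (20 ≤ j ∧ j < 30)) : Int),
         (0 : Int) + (tirage.countP (fun j => decide (30 ≤ j ∧ j < 40)) : Int),
         (0 : Int) + (tirage.countP (fun j => decide (40 ≤ j)) : Int)] 0 : Int) =
      pvDecades.foldl (fun acc p => acc + (if pvDecadeEmpty tirage p.1 p.2 then 1 else 0)) 0 := by
    simp only [pvDecades, List.foldl_cons, List.foldl_nil, e0, e1, e2, e3, e4,
      PySem.List.count_eq, List.count_cons, List.count_nil, beq_iff_eq,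
      decide_eq_true_eq, zero_add, Nat.cast_eq_zero]
    push_cast
    split_ifs <;> norm_num
  simp only [hdiz]
  cases PySem.List.pyGet? dizaine 0 <;> cases PySem.List.pyGet? dizaine 1 <;> rfl
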